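-- pv_equiv track=rewrite | github.com/awillette89/PACs-lab-simulator | src/admin/create_mwl_from_er7.py | parse_er7
-- ===== SOURCE A (Python) =====
-- def parse_er7(lines):
--     fields = {"PID": {}, "ORC": {}, "OBR": {}}
--     for raw in lines:
--         seg = raw.strip()
--         if not seg: continue
--         parts = seg.split("|")
--         t = parts[0]
--         if t == "PID":
--             # PID|1||PID-3||PID-5||PID-7|PID-8
--             fields["PID"]["3"] = parts[3] if len(parts) > 3 else ""
--             fields["PID"]["5"] = parts[5] if len(parts) > 5 else ""
--             fields["PID"]["7"] = parts[7] if len(parts) > 7 else ""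
--             fields["PID"]["8"] = parts[8] if len(parts) > 8 else ""
--         elif t == "ORC":
--             # ORC|NW|RP_ID|ACC
--             fields["ORC"]["2"] = parts[2] if len(parts) > 2 else ""
--             fields["ORC"]["3"] = parts[3] if len(parts) > 3 else ""
--         elif t == "OBR":
--             # OBR|1|ACC|ACC|CTCHEST^PROC_TEXT
--             fields["OBR"]["3"] = parts[3] if len(parts) > 3 else ""
--             fields["OBR"]["4"] = parts[4] if len(parts) > 4 else ""
--     return fields
-- ===== SOURCE B (Python) =====
-- def parse_er7(lines):
--     # Table-driven, backward search: for each segment type find the LAST line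
--     # whose first '|'-field is that type and build its field dict directly from it.
--     SPEC = {
--         "PID": [("3", 3), ("5", 5), ("7", 7), ("8", 8)],
--         "ORC": [("2", 2), ("3", 3)],
--         "OBR": [("3", 3), ("4", 4)],
--     }
--     fields = {}
--     for t, pairs in SPEC.items():
--         fields[t] = {}
--         for raw in reversed(lines):
--             parts = raw.strip().split("|")
--             if parts[0] == t:
--                 fields[t] = {k: parts[i] if len(parts) > i else "" for k, i in pairs}
--                 break
--     return fields
-- ===== Notes on version B (the rewrite author's own statement) =====
-- stated objective: alternative
-- what changed: Replaces A's single cumulative loop with per-segment branch blocks mutating nested dicts by a static spec table plus a backward search: for each segment type the field dict is built directly from the LAST matching line (each matching line in A overwrites every field, so only the last one matters).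
import Mathlib
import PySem

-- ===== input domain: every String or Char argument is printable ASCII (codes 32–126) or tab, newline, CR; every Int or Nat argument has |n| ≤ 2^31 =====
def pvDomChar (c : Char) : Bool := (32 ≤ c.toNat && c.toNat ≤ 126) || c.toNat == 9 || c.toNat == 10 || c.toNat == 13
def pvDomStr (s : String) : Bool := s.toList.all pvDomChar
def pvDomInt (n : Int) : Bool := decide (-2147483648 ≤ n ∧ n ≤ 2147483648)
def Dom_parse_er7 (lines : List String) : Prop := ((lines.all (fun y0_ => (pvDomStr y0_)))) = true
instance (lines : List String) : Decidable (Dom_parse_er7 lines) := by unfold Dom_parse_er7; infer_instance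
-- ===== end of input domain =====

-- B replaces A's cumulative branch-per-segment mutation loop by a spec table and a
-- backward search for the last matching line per segment type (objective: alternative).


-- shared tiny helper: Python's `parts[i] if len(parts) > i else ""` (appears verbatim in both sources)
def pvIdxD (parts : List String) (i : Int) : String :=
  if i < PySem.List.len parts then PySem.List.pyGetD parts i "" else ""

-- ===== PORT A =====
-- A's loop body as a named helper (same branches, same order; `raw.strip().split("|")`
-- via PySem.Str.strip / split? — split? is some _ here since the separator "|" ≠ "")
def pvStepA (fields : PySem.Dict String (PySem.Dict String String)) (raw : String) :
    PySem.Dict String (PySem.Dict String String) :=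
  let seg := PySem.Str.strip raw
  if seg = "" then fields
  else
    let parts := (PySem.Str.split? seg "|").getD []
    let t := PySem.List.pyGetD parts 0 ""
    if t = "PID" then
      fields.insert "PID" (((((fields.getD "PID" PySem.Dict.empty).insert "3" (pvIdxD parts 3)).insert
        "5" (pvIdxD parts 5)).insert "7" (pvIdxD parts 7)).insert "8" (pvIdxD parts 8))
    else if t = "ORC" then
      fields.insert "ORC" (((fields.getD "ORC" PySem.Dict.empty).insert "2" (pvIdxD parts 2)).insert
        "3" (pvIdxD parts 3))
    else if t = "OBR" then
      fields.insert "OBR" (((fields.getD "OBR" PySem.Dict.empty).insert "3" (pvIdxD parts 3)).insert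
        "4" (pvIdxD parts 4))
    else fields

def parse_er7 (lines : List String) : List (String × List (String × String)) :=
  let fields := lines.foldl pvStepA
    (PySem.Dict.ofList [("PID", PySem.Dict.empty), ("ORC", PySem.Dict.empty), ("OBR", PySem.Dict.empty)])
  fields.items.map (fun p => (p.1, p.2.items))

-- ===== PORT B =====
-- the test of Source B's inner loop: does line `raw`'s first '|'-field equal `t`? (then its parts)
def pvHit (t : String) (raw : String) : Option (List String) :=
  let parts := (PySem.Str.split? (PySem.Str.strip raw) "|").getD []
  if PySem.List.pyGetD parts 0 "" = t then some parts else none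

-- Source B's inner loop: backward scan with break = findSome? over the reversed list,
-- then the dict comprehension over the spec pairs
def pvBuild (t : String) (pairs : List (String × Int)) (lines : List String) :
    List (String × String) :=
  match lines.reverse.findSome? (pvHit t) with
  | none => []
  | some parts => pairs.map (fun p => (p.1, pvIdxD parts p.2))

def parse_er7_alt (lines : List String) : List (String × List (String × String)) :=
  [("PID", [("3", (3 : Int)), ("5", 5), ("7", 7), ("8", 8)]),
   ("ORC", [("2", 2), ("3", 3)]),
   ("OBR", [("3", 3), ("4", 4)])].map (fun s => (s.1, pvBuild s.1 s.2 lines))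

-- ===== PRECONDITION & SPEC =====
def Spec_parse_er7 (lines : List String) (out : List (String × List (String × String))) : Prop := out = parse_er7_alt lines
instance (lines : List String) (out : List (String × List (String × String))) : Decidable (Spec_parse_er7 lines out) := by unfold Spec_parse_er7; infer_instance

-- ===== CLAIM (what is proved, stated in full; the proofs are below) =====
def Claim_equal_parse_er7 : Prop := ∀ (lines : List String), Dom_parse_er7 lines → Spec_parse_er7 lines (parse_er7 lines)

-- ===== LEMMAS AND PROOFS =====

-- proof-only helpers: the inner dict each segment type carries (empty, or determined
-- by the parts of the last matching line), and the invariant shape of A's outer dict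
def pvInner (pairs : List (String × Int)) : Option (List String) → PySem.Dict String String
  | none => PySem.Dict.empty
  | some parts => PySem.Dict.mk (pairs.map (fun p => (p.1, pvIdxD parts p.2)))

def pvPairsPID : List (String × Int) := [("3", 3), ("5", 5), ("7", 7), ("8", 8)]
def pvPairsORC : List (String × Int) := [("2", 2), ("3", 3)]
def pvPairsOBR : List (String × Int) := [("3", 3), ("4", 4)]

def pvSt (p q r : Option (List String)) : PySem.Dict String (PySem.Dict String String) :=
  PySem.Dict.mk [("PID", pvInner pvPairsPID p), ("ORC", pvInner pvPairsORC q), ("OBR", pvInner pvPairsOBR r)]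

-- one step of A's loop updates exactly the segment the line names (hit = last wins)
theorem pvStepA_eq (p q r : Option (List String)) (raw : String) :
    pvStepA (pvSt p q r) raw =
      pvSt ((pvHit "PID" raw).or p) ((pvHit "ORC" raw).or q) ((pvHit "OBR" raw).or r) := by
  unfold pvStepA pvHit
  by_cases h : PySem.Str.strip raw = ""
  · have e : PySem.List.pyGetD ((PySem.Str.split? ("" : String) "|").getD []) 0 "" = "" := by decide
    simp [h, e]
  · simp only [h]
    by_cases h1 : PySem.List.pyGetD ((PySem.Str.split? (PySem.Str.strip raw) "|").getD []) 0 "" = "PID"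
    · simp only [h1]
      cases p <;> rfl
    · by_cases h2 : PySem.List.pyGetD ((PySem.Str.split? (PySem.Str.strip raw) "|").getD []) 0 "" = "ORC"
      · simp only [h2]
        cases q <;> rfl
      · by_cases h3 : PySem.List.pyGetD ((PySem.Str.split? (PySem.Str.strip raw) "|").getD []) 0 "" = "OBR"
        · simp only [h3]
          cases r <;> rfl
        · simp [h1, h2, h3]

-- A's whole fold, from any invariant state: each slot holds the last hit, else the start value
theorem pvFoldA (lines : List String) : ∀ p q r,
    lines.foldl pvStepA (pvSt p q r) =
      pvSt ((lines.reverse.findSome? (pvHit "PID")).or p)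
           ((lines.reverse.findSome? (pvHit "ORC")).or q)
           ((lines.reverse.findSome? (pvHit "OBR")).or r) := by
  induction lines with
  | nil => intro p q r; simp
  | cons raw rest ih =>
      intro p q r
      simp only [List.foldl_cons, pvStepA_eq, ih, List.reverse_cons, List.findSome?_append,
        List.findSome?_cons, List.findSome?_nil, Option.or_assoc]
      cases pvHit "PID" raw <;> cases pvHit "ORC" raw <;> cases pvHit "OBR" raw <;> simp

-- Source B's per-type build is exactly the items of the invariant inner dict
theorem pvBuild_eq (t : String) (pairs : List (String × Int)) (lines : List String) :
    pvBuild t pairs lines = (pvInner pairs (lines.reverse.findSome? (pvHit t))).items := by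
  unfold pvBuild
  cases lines.reverse.findSome? (pvHit t) <;> rfl

-- ===== VERDICT (by name: the statement is the Claim_ definition above) =====
theorem parse_er7_spec : Claim_equal_parse_er7 := by
  intro lines _
  show parse_er7 lines = parse_er7_alt lines
  unfold parse_er7
  have h0 : PySem.Dict.ofList [("PID", PySem.Dict.empty), ("ORC", PySem.Dict.empty), ("OBR", PySem.Dict.empty)]
      = pvSt none none none := rfl
  rw [h0, pvFoldA]
  simp only [Option.or_none]
  unfold parse_er7_alt
  simp only [List.map_cons, List.map_nil, pvBuild_eq]
  cases lines.reverse.findSome? (pvHit "PID") <;>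
    cases lines.reverse.findSome? (pvHit "ORC") <;>
      cases lines.reverse.findSome? (pvHit "OBR") <;> rfl
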